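-- pv_equiv track=rewrite | github.com/SunHwan-Park/problem-solving | 9489/9489.py | find
-- ===== SOURCE A (Python) =====
-- def find(area):
--     max_ruin = 0
--     for line in area:
--         for ruin in line.split('0'):
--             now = len(ruin)
--             if now > max_ruin:
--                 max_ruin = now
--     return max_ruin
-- ===== SOURCE B (Python) =====
-- def find(area):
--     best = 0
--     for line in area:
--         run = 0
--         for ch in line:
--             if ch == '0':
--                 run = 0
--             else:
--                 run += 1
--                 if run > best:
--                     best = run
--     return best
-- ===== Notes on version B (the rewrite author's own statement) =====
-- stated objective: alternative
-- what changed: Replaced the split('0')-and-measure-substrings approach by a single per-character run-length scan that keeps a current-run counter and updates the global maximum in place, never materialising the split segments.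
import Mathlib
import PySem

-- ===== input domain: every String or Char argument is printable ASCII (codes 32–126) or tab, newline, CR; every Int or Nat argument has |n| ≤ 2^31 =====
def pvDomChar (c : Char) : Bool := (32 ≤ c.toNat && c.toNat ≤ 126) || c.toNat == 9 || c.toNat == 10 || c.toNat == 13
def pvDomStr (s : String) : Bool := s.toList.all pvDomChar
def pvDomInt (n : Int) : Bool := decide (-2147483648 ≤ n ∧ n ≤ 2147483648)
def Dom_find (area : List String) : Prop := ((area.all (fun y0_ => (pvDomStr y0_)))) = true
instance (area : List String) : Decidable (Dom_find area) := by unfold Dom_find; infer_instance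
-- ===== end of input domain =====

-- B replaces split('0')-and-measure by a single per-character run-length scan (alternative decomposition, same cost).
-- ===== PORT A =====
-- line.split('0'): sep "0" is nonempty, so PySem.Str.split? always returns some; .getD [] only unwraps it.
def find (area : List String) : Int :=
  area.foldl
    (fun max_ruin line =>
      ((PySem.Str.split? line "0").getD []).foldl
        (fun max_ruin ruin =>
          let now := PySem.Str.len ruin
          if now > max_ruin then now else max_ruin)
        max_ruin)
    0

-- ===== PORT B =====
def find_alt (area : List String) : Int :=
  area.foldl
    (fun best line =>
      (line.toList.foldl
        (fun (st : Int × Int) ch =>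
          if ch = '0' then (st.1, 0)
          else
            let run := st.2 + 1
            (if run > st.1 then run else st.1, run))
        (best, 0)).1)
    0

-- ===== PRECONDITION & SPEC =====
def Spec_find (area : List String) (out : Int) : Prop := out = find_alt area
instance (area : List String) (out : Int) : Decidable (Spec_find area out) := by unfold Spec_find; infer_instance

-- ===== CLAIM (what is proved, stated in full; the proofs are below) =====
def Claim_equal_find : Prop := ∀ (area : List String), Dom_find area → Spec_find area (find area)

-- ===== LEMMAS AND PROOFS =====

-- split of a line at a single-char separator, as a clean structural recursion
def pvSplitC (c : Char) : List Char → List (List Char)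
  | [] => [[]]
  | x :: t =>
    if x = c then [] :: pvSplitC c t
    else
      match pvSplitC c t with
      | [] => [[x]]
      | y :: ys => (x :: y) :: ys

def pvAddFirst (p : List Char) : List (List Char) → List (List Char)
  | [] => [p]
  | y :: ys => (p ++ y) :: ys

-- max over segment lengths of the '0'-split, with `cur` added onto the first segment
def pvMsplit : List Char → Int → Int
  | [], cur => cur
  | x :: t, cur => if x = '0' then max cur (pvMsplit t 0) else pvMsplit t (cur + 1)

lemma pvSplitC_ne_nil (c : Char) (l : List Char) : pvSplitC c l ≠ [] := by
  cases l with
  | nil => simp [pvSplitC]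
  | cons x t =>
    simp only [pvSplitC]
    split
    · simp
    · split <;> simp

lemma pvGoSingle (c : Char) : ∀ (fuel : Nat) (l cur : List Char) (acc : List (List Char)),
    l.length < fuel →
    PySem.Chars.splitOn.go [c] fuel l cur acc = acc.reverse ++ pvAddFirst cur.reverse (pvSplitC c l) := by
  intro fuel
  induction fuel with
  | zero => intro l cur acc h; omega
  | succ fuel ih =>
    intro l cur acc h
    cases l with
    | nil =>
      simp [PySem.Chars.splitOn.go, pvSplitC, pvAddFirst]
    | cons x rest =>
      by_cases hx : x = c
      · have hp : List.isPrefixOf [c] (x :: rest) = true := by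
          simp [List.isPrefixOf, hx]
        simp only [PySem.Chars.splitOn.go, hp, if_pos, List.length_cons, List.drop_succ_cons,
          List.length_nil, List.drop_zero]
        rw [ih rest [] (cur.reverse :: acc) (by simp at h ⊢; omega)]
        obtain ⟨y, ys, hy⟩ : ∃ y ys, pvSplitC c rest = y :: ys := by
          rcases hl : pvSplitC c rest with _ | ⟨y, ys⟩
          · exact absurd hl (pvSplitC_ne_nil c rest)
          · exact ⟨y, ys, rfl⟩
        simp [pvSplitC, hx, hy, pvAddFirst]
      · have hp : List.isPrefixOf [c] (x :: rest) = false := by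
          simp [List.isPrefixOf]
          exact fun hh => absurd hh.symm hx
        simp only [PySem.Chars.splitOn.go, hp, Bool.false_eq_true, if_false]
        rw [ih rest (x :: cur) acc (by simp at h ⊢; omega)]
        obtain ⟨y, ys, hy⟩ : ∃ y ys, pvSplitC c rest = y :: ys := by
          rcases hl : pvSplitC c rest with _ | ⟨y, ys⟩
          · exact absurd hl (pvSplitC_ne_nil c rest)
          · exact ⟨y, ys, rfl⟩
        simp [pvSplitC, hx, hy, pvAddFirst]

lemma pvSplitOnSingle (c : Char) (l : List Char) :
    PySem.Chars.splitOn l [c] = pvSplitC c l := by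
  rw [PySem.Chars.splitOn, pvGoSingle c (l.length + 1) l [] [] (by omega)]
  obtain ⟨y, ys, hy⟩ : ∃ y ys, pvSplitC c l = y :: ys := by
    rcases hl : pvSplitC c l with _ | ⟨y, ys⟩
    · exact absurd hl (pvSplitC_ne_nil c l)
    · exact ⟨y, ys, rfl⟩
  simp [hy, pvAddFirst]

lemma le_pvMsplit : ∀ (l : List Char) (cur : Int), cur ≤ pvMsplit l cur := by
  intro l
  induction l with
  | nil => intro cur; simp [pvMsplit]
  | cons x t ih =>
    intro cur
    simp only [pvMsplit]
    split
    · exact le_max_left _ _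
    · have := ih (cur + 1); omega

lemma pvScanB : ∀ (cs : List Char) (best cur : Int), 0 ≤ cur → cur ≤ best →
    (cs.foldl
      (fun (st : Int × Int) ch =>
        if ch = '0' then (st.1, 0)
        else
          let run := st.2 + 1
          (if run > st.1 then run else st.1, run))
      (best, cur)).1 = max best (pvMsplit cs cur) := by
  intro cs
  induction cs with
  | nil => intro best cur _ h; simp [pvMsplit]; omega
  | cons x t ih =>
    intro best cur h0 h
    by_cases hx : x = '0'
    · simp only [List.foldl_cons, hx, if_pos]
      rw [ih best 0 le_rfl (le_trans h0 h)]
      simp only [pvMsplit, if_pos]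
      have := le_pvMsplit t (0 : Int)
      omega
    · simp only [List.foldl_cons, hx, if_false, pvMsplit]
      rw [ih (if cur + 1 > best then cur + 1 else best) (cur + 1) (by omega) (by split <;> omega)]
      have := le_pvMsplit t (cur + 1)
      split <;> omega

lemma pvFoldA : ∀ (cs : List Char) (m : Int) (p : List Char),
    List.foldl (fun (m : Int) (seg : List Char) =>
        if (seg.length : Int) > m then (seg.length : Int) else m)
      m (pvAddFirst p (pvSplitC '0' cs)) = max m (pvMsplit cs (p.length : Int)) := by
  intro cs
  induction cs with
  | nil =>
    intro m p
    simp [pvSplitC, pvAddFirst, pvMsplit]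
    split <;> omega
  | cons x t ih =>
    intro m p
    by_cases hx : x = '0'
    · simp only [pvSplitC, hx, if_pos, pvAddFirst, List.append_nil, List.foldl_cons, pvMsplit]
      obtain ⟨y, ys, hy⟩ : ∃ y ys, pvSplitC '0' t = y :: ys := by
        rcases hl : pvSplitC '0' t with _ | ⟨y, ys⟩
        · exact absurd hl (pvSplitC_ne_nil '0' t)
        · exact ⟨y, ys, rfl⟩
      have h2 := ih (if (p.length : Int) > m then (p.length : Int) else m) []
      simp only [hy, pvAddFirst, List.nil_append, List.length_nil, Nat.cast_zero] at h2 ⊢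
      rw [h2]
      split <;> omega
    · obtain ⟨y, ys, hy⟩ : ∃ y ys, pvSplitC '0' t = y :: ys := by
        rcases hl : pvSplitC '0' t with _ | ⟨y, ys⟩
        · exact absurd hl (pvSplitC_ne_nil '0' t)
        · exact ⟨y, ys, rfl⟩
      simp only [pvSplitC, hx, if_false, hy, pvAddFirst, pvMsplit]
      have h2 := ih m (p ++ [x])
      simp only [hy, pvAddFirst, List.append_assoc, List.singleton_append, List.length_append,
        List.length_cons, List.length_nil, Nat.cast_add, Nat.cast_one] at h2
      rw [h2]; norm_num

lemma pvInnerA (line : String) (m : Int) :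
    ((PySem.Str.split? line "0").getD []).foldl
      (fun max_ruin ruin =>
        let now := PySem.Str.len ruin
        if now > max_ruin then now else max_ruin)
      m = max m (pvMsplit line.toList 0) := by
  have hs : PySem.Str.split? line "0" = some ((PySem.Chars.splitOn line.toList ['0']).map String.ofList) := by
    simp [PySem.Str.split?, PySem.Chars.split?]
  rw [hs, Option.getD_some, pvSplitOnSingle, List.foldl_map]
  obtain ⟨y, ys, hy⟩ : ∃ y ys, pvSplitC '0' line.toList = y :: ys := by
    rcases hl : pvSplitC '0' line.toList with _ | ⟨y, ys⟩
    · exact absurd hl (pvSplitC_ne_nil '0' line.toList)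
    · exact ⟨y, ys, rfl⟩
  have hfun : (fun (max_ruin : Int) (ruin : List Char) =>
      let now := PySem.Str.len (String.ofList ruin)
      if now > max_ruin then now else max_ruin)
      = (fun (m : Int) (seg : List Char) =>
        if (seg.length : Int) > m then (seg.length : Int) else m) := by
    funext m seg
    simp [PySem.Str.len_eq]
  rw [hfun]
  have h2 := pvFoldA line.toList m []
  simp only [hy, pvAddFirst, List.nil_append, List.length_nil, Nat.cast_zero] at h2
  rw [hy, h2]

lemma pvMain : ∀ (area : List String) (m : Int), 0 ≤ m →
    area.foldl
      (fun max_ruin line =>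
        ((PySem.Str.split? line "0").getD []).foldl
          (fun max_ruin ruin =>
            let now := PySem.Str.len ruin
            if now > max_ruin then now else max_ruin)
          max_ruin)
      m
    =
    area.foldl
      (fun best line =>
        (line.toList.foldl
          (fun (st : Int × Int) ch =>
            if ch = '0' then (st.1, 0)
            else
              let run := st.2 + 1
              (if run > st.1 then run else st.1, run))
          (best, 0)).1)
      m := by
  intro area
  induction area with
  | nil => intro m _; rfl
  | cons line rest ih =>
    intro m hm
    simp only [List.foldl_cons]
    rw [pvInnerA line m, pvScanB line.toList m 0 le_rfl hm, ih _ (by omega)]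

-- ===== VERDICT (by name: the statement is the Claim_ definition above) =====
theorem find_spec : Claim_equal_find := by
  intro area _
  unfold Spec_find find find_alt
  exact pvMain area 0 le_rfl
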